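-- pv_equiv track=rewrite | github.com/aurelsans17/tugas-akhir | graph_app/views.py | calculate_local_metric_basis
-- ===== SOURCE A (Python) =====
-- from collections import deque
--
-- def calculate_local_metric_basis(n):
--     graph = {i: [] for i in range(n)}
--     for i in range(n - 1):
--         graph[i].append(i + 1)
--         graph[i + 1].append(i)
--
--     W_l = [i + 1 for i in range(1, n, 3)]
--     if n % 3 != 0 and n not in W_l:
--         W_l.append(n)
--
--     distances_table = {v: bfs_distances(graph, v - 1, n) for v in W_l}
--     return W_l, distances_table, graph
--
-- def bfs_distances(graph, start, n):
--     distances = [-1] * n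
--     distances[start] = 0
--     queue = deque([start])
--
--     while queue:
--         current = queue.popleft()
--         for neighbor in graph[current]:
--             if distances[neighbor] == -1:
--                 distances[neighbor] = distances[current] + 1
--                 queue.append(neighbor)
--     return distances
-- ===== SOURCE B (Python) =====
-- def calculate_local_metric_basis(n):
--     # Closed form: in the path 0-1-...-(n-1), BFS distance from s to i is |i - s|.
--     def nbrs(i):
--         out = []
--         if i > 0:
--             out.append(i - 1)
--         if i < n - 1:
--             out.append(i + 1)
--         return out
--     graph = {i: nbrs(i) for i in range(n)}
--     W_l = list(range(2, n + 1, 3))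
--     if n % 3 != 0 and n not in W_l:
--         W_l.append(n)
--     distances_table = {v: [abs(i - (v - 1)) for i in range(n)] for v in W_l}
--     return W_l, distances_table, graph
-- ===== Notes on version B (the rewrite author's own statement) =====
-- stated objective: simpler
-- what changed: Replaces the per-vertex BFS over a dict-of-lists path graph with the closed-form path distance |i - (v-1)|, and builds each adjacency list directly instead of patching a dict of empty lists with two appends per edge.
import Mathlib
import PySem

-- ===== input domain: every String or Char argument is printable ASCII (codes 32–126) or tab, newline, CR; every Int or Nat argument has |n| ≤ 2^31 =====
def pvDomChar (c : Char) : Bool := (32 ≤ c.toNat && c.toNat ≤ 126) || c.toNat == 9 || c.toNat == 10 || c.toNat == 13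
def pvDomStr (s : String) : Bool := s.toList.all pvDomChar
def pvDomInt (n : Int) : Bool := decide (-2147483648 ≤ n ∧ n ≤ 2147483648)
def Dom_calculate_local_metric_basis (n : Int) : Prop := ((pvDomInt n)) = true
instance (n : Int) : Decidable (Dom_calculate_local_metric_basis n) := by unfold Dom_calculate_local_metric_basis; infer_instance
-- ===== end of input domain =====

-- B replaces the per-vertex BFS by the closed-form path distance |i - start| and builds each
-- adjacency list directly, instead of BFS with a queue over a dict patched by two append loops.

-- ===== PORT A =====
-- while queue: … (deque BFS).  Fueled loop; fuel n+1 bounds the number of dequeues (each vertex is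
-- enqueued at most once), and the equivalence proof shows the queue empties before the fuel does.
-- pyGetD's default -2 is never read: on inputs admitted by Pre_ every index accessed is in range
-- (where Python would raise IndexError the input is outside Pre_).
def bfsLoop (graph : PySem.Dict Int (List Int)) : Nat → List Int → List Int → List Int
  | _, dist, [] => dist
  | 0, dist, _ :: _ => dist
  | fuel + 1, dist, current :: rest =>
      let st := (graph.getD current []).foldl
        (fun (st : List Int × List Int) neighbor =>
          if PySem.List.pyGetD st.1 neighbor (-2) = -1 then
            (PySem.List.pySetD st.1 neighbor (PySem.List.pyGetD st.1 current (-2) + 1),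
             st.2 ++ [neighbor])
          else st) (dist, rest)
      bfsLoop graph fuel st.1 st.2

def bfs_distances (graph : PySem.Dict Int (List Int)) (start n : Int) : List Int :=
  let distances := List.replicate n.toNat (-1 : Int)      -- [-1] * n
  let distances := PySem.List.pySetD distances start 0    -- distances[start] = 0 (in range under Pre_)
  bfsLoop graph (n.toNat + 1) distances [start]

def calculate_local_metric_basis (n : Int) : List Int × (List (Int × List Int)) × (List (Int × List Int)) :=
  let graph : PySem.Dict Int (List Int) :=
    (PySem.List.pyRange 0 n 1).foldl (fun d i => d.insert i []) PySem.Dict.empty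
  let graph :=
    (PySem.List.pyRange 0 (n - 1) 1).foldl
      (fun d i => (d.modify i [] (fun l => l ++ [i + 1])).modify (i + 1) [] (fun l => l ++ [i])) graph
  let W_l := (PySem.List.pyRange 1 n 3).map (fun i => i + 1)
  let W_l := if PySem.Int.mod n 3 ≠ 0 ∧ n ∉ W_l then W_l ++ [n] else W_l
  let distances_table := W_l.foldl (fun d v => d.insert v (bfs_distances graph (v - 1) n)) PySem.Dict.empty
  (W_l, distances_table.items, graph.items)

-- ===== PORT B =====
def calculate_local_metric_basis_alt (n : Int) : List Int × (List (Int × List Int)) × (List (Int × List Int)) :=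
  let nbrs := fun (i : Int) => (if 0 < i then [i - 1] else []) ++ (if i < n - 1 then [i + 1] else [])
  let graph : PySem.Dict Int (List Int) :=
    (PySem.List.pyRange 0 n 1).foldl (fun d i => d.insert i (nbrs i)) PySem.Dict.empty
  let W_l := PySem.List.pyRange 2 (n + 1) 3
  let W_l := if PySem.Int.mod n 3 ≠ 0 ∧ n ∉ W_l then W_l ++ [n] else W_l
  let distances_table :=
    W_l.foldl (fun d v => d.insert v ((PySem.List.pyRange 0 n 1).map (fun i => |i - (v - 1)|))) PySem.Dict.empty
  (W_l, distances_table.items, graph.items)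

-- ===== PRECONDITION & SPEC =====
-- Pre_ excludes exactly the n where A raises IndexError (n < 0 with n % 3 ≠ 0: W_l = [n] and
-- distances[n-1] indexes the empty list).  A returns on every other input.
def Pre_calculate_local_metric_basis (n : Int) : Prop := 0 ≤ n ∨ PySem.Int.mod n 3 = 0
instance (n : Int) : Decidable (Pre_calculate_local_metric_basis n) := by unfold Pre_calculate_local_metric_basis; infer_instance
def pvWitness_calculate_local_metric_basis : Int := 7

def Spec_calculate_local_metric_basis (n : Int) (out : List Int × (List (Int × List Int)) × (List (Int × List Int))) : Prop := out = calculate_local_metric_basis_alt n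
instance (n : Int) (out : List Int × (List (Int × List Int)) × (List (Int × List Int))) : Decidable (Spec_calculate_local_metric_basis n out) := by unfold Spec_calculate_local_metric_basis; infer_instance

-- ===== CLAIM (what is proved, stated in full; the proofs are below) =====
def Claim_equal_calculate_local_metric_basis : Prop := ∀ (n : Int), Dom_calculate_local_metric_basis n → Pre_calculate_local_metric_basis n → Spec_calculate_local_metric_basis n (calculate_local_metric_basis n)

-- ===== LEMMAS AND PROOFS =====

-- A's graph after both construction loops, and B's neighbour function.
def pvGraphA (n : Int) : PySem.Dict Int (List Int) :=
  (PySem.List.pyRange 0 (n - 1) 1).foldl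
    (fun d i => (d.modify i [] (fun l => l ++ [i + 1])).modify (i + 1) [] (fun l => l ++ [i]))
    ((PySem.List.pyRange 0 n 1).foldl (fun d i => d.insert i []) PySem.Dict.empty)

def pvNbrs (n i : Int) : List Int :=
  (if 0 < i then [i - 1] else []) ++ (if i < n - 1 then [i + 1] else [])

-- the BFS distance list when exactly the interval [L, R] has been reached
def pvM (n s L R : Int) : List Int :=
  (PySem.List.pyRange 0 n 1).map (fun i => if L ≤ i ∧ i ≤ R then |i - s| else -1)

lemma pvFold_pairs (l : List Int) (d : PySem.Dict Int (List Int)) :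
    l.foldl (fun d i => (d.modify i [] (fun l => l ++ [i + 1])).modify (i + 1) [] (fun l => l ++ [i])) d
      = (l.flatMap (fun i => [(i, i + 1), (i + 1, i)])).foldl
          (fun d p => d.modify p.1 [] (fun l => l ++ [p.2])) d := by
  induction l generalizing d with
  | nil => rfl
  | cons x xs ih => simp [List.foldl, ih]

lemma pvBase_getD (n c : Int) :
    (((PySem.List.pyRange 0 n 1).foldl (fun d i => d.insert i ([] : List Int)) PySem.Dict.empty)).getD c [] = [] := by
  have : ∀ (l : List Int) (d : PySem.Dict Int (List Int)), (∀ c, d.getD c [] = []) →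
      ∀ c, (l.foldl (fun d i => d.insert i ([] : List Int)) d).getD c [] = [] := by
    intro l
    induction l with
    | nil => intro d h c; exact h c
    | cons x xs ih =>
      intro d h c
      simp only [List.foldl]
      exact ih _ (fun c' => by rw [PySem.Dict.getD_insert]; split <;> simp [h]) c
  exact this _ _ (fun c => by simp [PySem.Dict.getD_empty]) c

lemma pvFilt (c : Int) (k : Nat) :
    (((PySem.List.pyRange 0 k 1).flatMap (fun i => [(i, i + 1), (i + 1, i)])).filter
        (fun p => p.1 == c)).map (·.2)
      = (if 0 ≤ c - 1 ∧ c - 1 < (k : Int) then [c - 1] else []) ++ (if 0 ≤ c ∧ c < (k : Int) then [c + 1] else []) := by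
  induction k with
  | zero =>
    rw [if_neg (by omega), if_neg (by omega)]
    simp
  | succ m ih =>
    rw [show ((m + 1 : Nat) : Int) = (m : Int) + 1 by push_cast; ring,
        PySem.List.pyRange_one_succ_right (by positivity)]
    simp only [List.flatMap_append, List.filter_append, List.map_append, ih, List.flatMap_cons,
      List.flatMap_nil, List.append_nil, List.filter_cons, List.filter_nil, beq_iff_eq]
    by_cases h1 : (m : Int) = c <;> by_cases h2 : (m : Int) + 1 = c
    · omega
    · simp only [if_pos h1, if_neg h2]
      subst h1
      split_ifs <;> first | (exfalso; omega) | simp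
    · simp only [if_neg h1, if_pos h2]
      rw [← h2]
      split_ifs <;> first | (exfalso; omega) | simp
    · simp only [if_neg h1, if_neg h2]
      split_ifs <;> first | (exfalso; omega) | simp

lemma pvGraphA_getD (n c : Int) :
    (pvGraphA n).getD c [] =
      (if 0 ≤ c - 1 ∧ c - 1 < n - 1 then [c - 1] else []) ++ (if 0 ≤ c ∧ c < n - 1 then [c + 1] else []) := by
  unfold pvGraphA
  rw [pvFold_pairs, PySem.Dict.getD_foldl_modify_append, pvBase_getD]
  by_cases hn : 0 ≤ n - 1
  · rw [show (n - 1) = (((n-1).toNat : Nat) : Int) by omega] at *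
    rw [pvFilt]
    simp
  · rw [PySem.List.pyRange_one_eq_nil (by omega), if_neg (by omega), if_neg (by omega)]
    simp

lemma pvGraphA_items (n : Int) :
    (pvGraphA n).items = (PySem.List.pyRange 0 n 1).map (fun i => (i, pvNbrs n i)) := by
  have hbase : (((PySem.List.pyRange 0 n 1).foldl (fun d i => d.insert i ([] : List Int)) PySem.Dict.empty)).items
      = (PySem.List.pyRange 0 n 1).map (fun i => (i, ([] : List Int))) := by
    rw [PySem.Dict.items_foldl_insert_fresh _ (fun i => i) (fun _ => []) _
        (fun a _ => by simp [PySem.Dict.contains_empty]) (by simpa using PySem.List.nodup_pyRange_one 0 n)]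
    simp [PySem.Dict.empty]
  have hkeysbase : (((PySem.List.pyRange 0 n 1).foldl (fun d i => d.insert i ([] : List Int)) PySem.Dict.empty)).keys
      = PySem.List.pyRange 0 n 1 := by
    show (((PySem.List.pyRange 0 n 1).foldl (fun d i => d.insert i ([] : List Int)) PySem.Dict.empty)).items.map (·.1)
      = PySem.List.pyRange 0 n 1
    rw [hbase]
    rw [List.map_map]
    have : ((fun x : Int × List Int => x.1) ∘ fun i : Int => (i, ([] : List Int))) = id := rfl
    rw [this, List.map_id]
  have hkeys : (pvGraphA n).keys = PySem.List.pyRange 0 n 1 := by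
    unfold pvGraphA
    rw [pvFold_pairs]
    rw [PySem.Dict.keys_foldl_modify_key _ (fun p : Int × Int => p.1) ([] : List Int)
        (fun _ (p : Int × Int) => (fun l : List Int => l ++ [p.2])) _]
    rw [hkeysbase, PySem.Set.update_eq_append_filter]
    rw [List.filter_eq_nil_iff.mpr, List.append_nil]
    intro a ha
    have := PySem.Set.mem_ofList (xs := ((PySem.List.pyRange 0 (n-1) 1).flatMap (fun i => [(i, i + 1), (i + 1, i)])).map (fun p => p.1)) (y := a) |>.mp ha
    simp only [List.mem_map, List.mem_flatMap] at this
    obtain ⟨p, ⟨i, hi, hp⟩, rfl⟩ := this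
    rw [PySem.List.mem_pyRange_one] at hi
    simp at hp
    have : 0 ≤ p.1 ∧ p.1 < n := by rcases hp with ⟨h,_⟩|⟨h,_⟩ <;> omega
    simp [PySem.List.mem_pyRange_one]
    omega
  have hnd : (pvGraphA n).keys.Nodup := by rw [hkeys]; exact PySem.List.nodup_pyRange_one 0 n
  rw [PySem.Dict.items_eq_map_keys _ hnd [], hkeys]
  apply List.map_congr_left
  intro i hi
  rw [PySem.List.mem_pyRange_one] at hi
  rw [pvGraphA_getD]
  unfold pvNbrs
  congr 1 <;> (split_ifs <;> first | (exfalso; omega) | rfl)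


lemma pvSet_map (f : Int → Int) (n j : Int) (v : Int) (h0 : 0 ≤ j) :
    PySem.List.pySetD ((PySem.List.pyRange 0 n 1).map f) j v
      = (PySem.List.pyRange 0 n 1).map (fun i => if i = j then v else f i) := by
  rw [PySem.List.pySetD_of_nonneg _ _ h0]
  apply List.ext_getElem
  · simp
  · intro k hk hk'
    simp only [List.getElem_set, List.getElem_map, PySem.List.getElem_pyRange_one]
    simp only [List.length_set, List.length_map, PySem.List.length_pyRange_one] at hk
    split_ifs with ha hb hb
    · rfl
    · exfalso; omega
    · exfalso; omega
    · rfl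

lemma pvM_get (n s L R i : Int) (h0 : 0 ≤ i) (h1 : i < n) (d : Int) :
    PySem.List.pyGetD (pvM n s L R) i d = if L ≤ i ∧ i ≤ R then |i - s| else -1 := by
  unfold pvM
  exact PySem.List.pyGetD_map_pyRange_of_nonneg _ n i d h0 h1

lemma pvM_set (n s L R L' R' j v : Int) (h0 : 0 ≤ j) (h1 : j < n) (hv : v = |j - s|)
    (hiff : ∀ i, (L' ≤ i ∧ i ≤ R') ↔ ((L ≤ i ∧ i ≤ R) ∨ i = j)) :
    PySem.List.pySetD (pvM n s L R) j v = pvM n s L' R' := by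
  unfold pvM
  rw [pvSet_map _ _ _ _ h0]
  apply List.map_congr_left
  intro i hi
  rw [PySem.List.mem_pyRange_one] at hi
  have hthis := hiff i
  by_cases hj : i = j
  · subst hj
    rw [if_pos rfl, hv, if_pos (hthis.mpr (Or.inr rfl))]
  · rw [if_neg hj]
    split_ifs with h1 h2 h2 <;> first | rfl | (exfalso; omega)

-- the loop invariant, with the fuel bound folded in
def pvInv (n s : Int) (fuel : Nat) (dist queue : List Int) : Prop :=
  (queue = [s] ∧ dist = pvM n s s s ∧ n ≤ (fuel : Int))
  ∨ (∃ t, 1 ≤ t ∧ 0 ≤ s - t ∧ s + t ≤ n - 1 ∧ queue = [s - t, s + t] ∧ dist = pvM n s (s - t) (s + t) ∧ n - 2*t + 1 ≤ (fuel : Int))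
  ∨ (∃ t, 1 ≤ t ∧ 0 ≤ s - t - 1 ∧ s + t ≤ n - 1 ∧ queue = [s + t, s - t - 1] ∧ dist = pvM n s (s - t - 1) (s + t) ∧ n - 2*t ≤ (fuel : Int))
  ∨ (∃ R, 1 ≤ R ∧ s ≤ R ∧ R ≤ n - 1 ∧ queue = [R] ∧ dist = pvM n s 0 R ∧ n - R ≤ (fuel : Int))
  ∨ (∃ L, 0 ≤ L ∧ L ≤ s - 1 ∧ queue = [L] ∧ dist = pvM n s L (n - 1) ∧ L + 1 ≤ (fuel : Int))
  ∨ (queue = [] ∧ dist = pvM n s 0 (n - 1))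

lemma pvAbsGe (a b : Int) (h : b ≤ a) : |a - b| = a - b := abs_of_nonneg (by omega)

lemma pvAbsLe (a b : Int) (h : a ≤ b) : |a - b| = b - a := by
  rw [abs_of_nonpos (by omega)]; ring

lemma pvAbs_ne_neg_one (a b : Int) : ¬ |a - b| = -1 := by
  have := abs_nonneg (a - b); omega

lemma pvInv_run (n s : Int) (hs0 : 0 ≤ s) (hs1 : s < n) :
    ∀ (fuel : Nat) (dist queue : List Int), pvInv n s fuel dist queue →
      bfsLoop (pvGraphA n) fuel dist queue = pvM n s 0 (n - 1) := by
  intro fuel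
  induction fuel with
  | zero =>
    intro dist queue h
    rcases h with ⟨hq, hd, hf⟩ | ⟨t, ht, h1, h2, hq, hd, hf⟩ | ⟨t, ht, h1, h2, hq, hd, hf⟩
      | ⟨R, h1, h2, h3, hq, hd, hf⟩ | ⟨L, h1, h2, hq, hd, hf⟩ | ⟨hq, hd⟩
    · exfalso; simp at hf; omega
    · exfalso; simp at hf; omega
    · exfalso; simp at hf; omega
    · exfalso; simp at hf; omega
    · exfalso; simp at hf; omega
    · subst hq hd; rfl
  | succ f ih =>
    intro dist queue h
    rcases h with ⟨hq, hd, hf⟩ | ⟨t, ht, h1, h2, hq, hd, hf⟩ | ⟨t, ht, h1, h2, hq, hd, hf⟩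
      | ⟨R, h1, h2, h3, hq, hd, hf⟩ | ⟨L, h1, h2, hq, hd, hf⟩ | ⟨hq, hd⟩
    · -- start state: queue = [s]
      subst hq hd
      simp only [bfsLoop, pvGraphA_getD]
      by_cases ha : 1 ≤ s <;> by_cases hb : s < n - 1
      · rw [if_pos (show 0 ≤ s - 1 ∧ s - 1 < n - 1 by omega),
            if_pos (show 0 ≤ s ∧ s < n - 1 by omega)]
        simp only [List.cons_append, List.nil_append, List.foldl_cons, List.foldl_nil]
        rw [pvM_get n s s s (s - 1) (by omega) (by omega),
            if_neg (show ¬(s ≤ s - 1 ∧ s - 1 ≤ s) by omega), if_pos rfl]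
        try dsimp only
        rw [pvM_get n s s s s (by omega) (by omega), if_pos (show s ≤ s ∧ s ≤ s by omega)]
        rw [pvM_set n s s s (s - 1) s (s - 1) (|s - s| + 1) (by omega) (by omega)
            (by rw [pvAbsLe _ _ (by omega), pvAbsLe _ _ (by omega)]; omega) (by omega)]
        try dsimp only
        rw [pvM_get n s (s - 1) s (s + 1) (by omega) (by omega),
            if_neg (show ¬(s - 1 ≤ s + 1 ∧ s + 1 ≤ s) by omega), if_pos rfl]
        try dsimp only
        rw [pvM_get n s (s - 1) s s (by omega) (by omega), if_pos (show s - 1 ≤ s ∧ s ≤ s by omega)]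
        rw [pvM_set n s (s - 1) s (s - 1) (s + 1) (s + 1) (|s - s| + 1) (by omega) (by omega)
            (by rw [pvAbsLe _ _ (by omega), pvAbsGe _ _ (by omega)]; omega) (by omega)]
        refine ih _ _ (Or.inr (Or.inl ⟨1, by omega, by omega, by omega, ?_, ?_, ?_⟩))
        · simp
        · norm_num
        · push_cast at hf ⊢; omega
      · rw [if_pos (show 0 ≤ s - 1 ∧ s - 1 < n - 1 by omega),
            if_neg (show ¬(0 ≤ s ∧ s < n - 1) by omega)]
        simp only [List.append_nil, List.foldl_cons, List.foldl_nil]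
        rw [pvM_get n s s s (s - 1) (by omega) (by omega),
            if_neg (show ¬(s ≤ s - 1 ∧ s - 1 ≤ s) by omega), if_pos rfl]
        try dsimp only
        rw [pvM_get n s s s s (by omega) (by omega), if_pos (show s ≤ s ∧ s ≤ s by omega)]
        rw [pvM_set n s s s (s - 1) s (s - 1) (|s - s| + 1) (by omega) (by omega)
            (by rw [pvAbsLe _ _ (by omega), pvAbsLe _ _ (by omega)]; omega) (by omega)]
        refine ih _ _ (Or.inr (Or.inr (Or.inr (Or.inr (Or.inl ⟨s - 1, by omega, by omega, ?_, ?_, ?_⟩)))))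
        · simp
        · rw [show n - 1 = s by omega]
        · push_cast at hf ⊢; omega
      · rw [if_neg (show ¬(0 ≤ s - 1 ∧ s - 1 < n - 1) by omega),
            if_pos (show 0 ≤ s ∧ s < n - 1 by omega)]
        simp only [List.nil_append, List.foldl_cons, List.foldl_nil]
        rw [pvM_get n s s s (s + 1) (by omega) (by omega),
            if_neg (show ¬(s ≤ s + 1 ∧ s + 1 ≤ s) by omega), if_pos rfl]
        try dsimp only
        rw [pvM_get n s s s s (by omega) (by omega), if_pos (show s ≤ s ∧ s ≤ s by omega)]
        rw [pvM_set n s s s s (s + 1) (s + 1) (|s - s| + 1) (by omega) (by omega)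
            (by rw [pvAbsLe _ _ (by omega), pvAbsGe _ _ (by omega)]; omega) (by omega)]
        refine ih _ _ (Or.inr (Or.inr (Or.inr (Or.inl ⟨s + 1, by omega, by omega, by omega, ?_, ?_, ?_⟩))))
        · simp
        · rw [show s = 0 by omega]
        · push_cast at hf ⊢; omega
      · rw [if_neg (show ¬(0 ≤ s - 1 ∧ s - 1 < n - 1) by omega),
            if_neg (show ¬(0 ≤ s ∧ s < n - 1) by omega)]
        simp only [List.nil_append, List.foldl_nil]
        rw [show s = 0 by omega]
        simp only [bfsLoop]
        rw [show n - 1 = 0 by omega]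
    · -- case (2): queue = [s - t, s + t]
      subst hq hd
      simp only [bfsLoop, pvGraphA_getD]
      rw [if_pos (show 0 ≤ s - t ∧ s - t < n - 1 by omega)]
      by_cases hc : 1 ≤ s - t
      · rw [if_pos (show 0 ≤ s - t - 1 ∧ s - t - 1 < n - 1 by omega)]
        simp only [List.cons_append, List.nil_append, List.foldl_cons, List.foldl_nil]
        rw [pvM_get n s (s - t) (s + t) (s - t - 1) (by omega) (by omega),
            if_neg (show ¬(s - t ≤ s - t - 1 ∧ s - t - 1 ≤ s + t) by omega), if_pos rfl]
        try dsimp only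
        rw [pvM_get n s (s - t) (s + t) (s - t) (by omega) (by omega),
            if_pos (show s - t ≤ s - t ∧ s - t ≤ s + t by omega)]
        rw [pvM_set n s (s - t) (s + t) (s - t - 1) (s + t) (s - t - 1) (|s - t - s| + 1)
            (by omega) (by omega)
            (by rw [pvAbsLe _ _ (by omega), pvAbsLe _ _ (by omega)]; omega) (by omega)]
        try dsimp only
        rw [pvM_get n s (s - t - 1) (s + t) (s - t + 1) (by omega) (by omega),
            if_pos (show s - t - 1 ≤ s - t + 1 ∧ s - t + 1 ≤ s + t by omega),
            if_neg (pvAbs_ne_neg_one _ _)]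
        try dsimp only
        refine ih _ _ (Or.inr (Or.inr (Or.inl ⟨t, ht, by omega, h2, ?_, rfl, ?_⟩)))
        · try simp
          try rfl
        · push_cast at hf ⊢; omega
      · rw [if_neg (show ¬(0 ≤ s - t - 1 ∧ s - t - 1 < n - 1) by omega)]
        simp only [List.nil_append, List.foldl_cons, List.foldl_nil]
        rw [pvM_get n s (s - t) (s + t) (s - t + 1) (by omega) (by omega),
            if_pos (show s - t ≤ s - t + 1 ∧ s - t + 1 ≤ s + t by omega),
            if_neg (pvAbs_ne_neg_one _ _)]
        try dsimp only
        refine ih _ _ (Or.inr (Or.inr (Or.inr (Or.inl ⟨s + t, by omega, by omega, by omega, rfl, ?_, ?_⟩))))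
        · rw [show (0 : Int) = s - t by omega]
        · push_cast at hf ⊢; omega
    · -- case (3): queue = [s + t, s - t - 1]
      subst hq hd
      simp only [bfsLoop, pvGraphA_getD]
      rw [if_pos (show 0 ≤ s + t - 1 ∧ s + t - 1 < n - 1 by omega)]
      by_cases hc : s + t < n - 1
      · rw [if_pos (show 0 ≤ s + t ∧ s + t < n - 1 by omega)]
        simp only [List.cons_append, List.nil_append, List.foldl_cons, List.foldl_nil]
        rw [pvM_get n s (s - t - 1) (s + t) (s + t - 1) (by omega) (by omega),
            if_pos (show s - t - 1 ≤ s + t - 1 ∧ s + t - 1 ≤ s + t by omega),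
            if_neg (pvAbs_ne_neg_one _ _)]
        try dsimp only
        rw [pvM_get n s (s - t - 1) (s + t) (s + t + 1) (by omega) (by omega),
            if_neg (show ¬(s - t - 1 ≤ s + t + 1 ∧ s + t + 1 ≤ s + t) by omega), if_pos rfl]
        try dsimp only
        rw [pvM_get n s (s - t - 1) (s + t) (s + t) (by omega) (by omega),
            if_pos (show s - t - 1 ≤ s + t ∧ s + t ≤ s + t by omega)]
        rw [pvM_set n s (s - t - 1) (s + t) (s - t - 1) (s + t + 1) (s + t + 1) (|s + t - s| + 1)
            (by omega) (by omega)
            (by rw [pvAbsGe _ _ (by omega), pvAbsGe _ _ (by omega)]; omega) (by omega)]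
        refine ih _ _ (Or.inr (Or.inl ⟨t + 1, by omega, by omega, by omega, ?_, ?_, ?_⟩))
        · have e1 : s - (t + 1) = s - t - 1 := by ring
          have e2 : s + (t + 1) = s + t + 1 := by ring
          rw [e1, e2]
          rfl
        · rw [show s - (t + 1) = s - t - 1 by ring, show s + (t + 1) = s + t + 1 by ring]
        · push_cast at hf ⊢; omega
      · rw [if_neg (show ¬(0 ≤ s + t ∧ s + t < n - 1) by omega)]
        simp only [List.append_nil, List.foldl_cons, List.foldl_nil]
        rw [pvM_get n s (s - t - 1) (s + t) (s + t - 1) (by omega) (by omega),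
            if_pos (show s - t - 1 ≤ s + t - 1 ∧ s + t - 1 ≤ s + t by omega),
            if_neg (pvAbs_ne_neg_one _ _)]
        try dsimp only
        refine ih _ _ (Or.inr (Or.inr (Or.inr (Or.inr (Or.inl ⟨s - t - 1, by omega, by omega, rfl, ?_, ?_⟩)))))
        · rw [show n - 1 = s + t by omega]
        · push_cast at hf ⊢; omega
    · -- case (4): queue = [R], interval [0, R]
      subst hq hd
      simp only [bfsLoop, pvGraphA_getD]
      rw [if_pos (show 0 ≤ R - 1 ∧ R - 1 < n - 1 by omega)]
      by_cases hR : R < n - 1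
      · rw [if_pos (show 0 ≤ R ∧ R < n - 1 by omega)]
        simp only [List.cons_append, List.nil_append, List.foldl_cons, List.foldl_nil]
        rw [pvM_get n s 0 R (R - 1) (by omega) (by omega),
            if_pos (show 0 ≤ R - 1 ∧ R - 1 ≤ R by omega), if_neg (pvAbs_ne_neg_one _ _)]
        try dsimp only
        rw [pvM_get n s 0 R (R + 1) (by omega) (by omega),
            if_neg (show ¬(0 ≤ R + 1 ∧ R + 1 ≤ R) by omega), if_pos rfl]
        try dsimp only
        rw [pvM_get n s 0 R R (by omega) (by omega), if_pos (show 0 ≤ R ∧ R ≤ R by omega)]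
        rw [pvM_set n s 0 R 0 (R + 1) (R + 1) (|R - s| + 1) (by omega) (by omega)
            (by rw [pvAbsGe _ _ (by omega), pvAbsGe _ _ (by omega)]; omega) (by omega)]
        refine ih _ _ (Or.inr (Or.inr (Or.inr (Or.inl ⟨R + 1, by omega, by omega, by omega, ?_, rfl, ?_⟩))))
        · simp
        · push_cast at hf ⊢; omega
      · rw [if_neg (show ¬(0 ≤ R ∧ R < n - 1) by omega)]
        simp only [List.append_nil, List.foldl_cons, List.foldl_nil]
        rw [pvM_get n s 0 R (R - 1) (by omega) (by omega),
            if_pos (show 0 ≤ R - 1 ∧ R - 1 ≤ R by omega), if_neg (pvAbs_ne_neg_one _ _)]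
        try dsimp only
        rw [show R = n - 1 by omega]
        simp only [bfsLoop]
    · -- case (5): queue = [L], interval [L, n - 1]
      subst hq hd
      simp only [bfsLoop, pvGraphA_getD]
      rw [if_pos (show 0 ≤ L ∧ L < n - 1 by omega)]
      by_cases hL : 1 ≤ L
      · rw [if_pos (show 0 ≤ L - 1 ∧ L - 1 < n - 1 by omega)]
        simp only [List.cons_append, List.nil_append, List.foldl_cons, List.foldl_nil]
        rw [pvM_get n s L (n - 1) (L - 1) (by omega) (by omega),
            if_neg (show ¬(L ≤ L - 1 ∧ L - 1 ≤ n - 1) by omega), if_pos rfl]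
        try dsimp only
        rw [pvM_get n s L (n - 1) L (by omega) (by omega),
            if_pos (show L ≤ L ∧ L ≤ n - 1 by omega)]
        rw [pvM_set n s L (n - 1) (L - 1) (n - 1) (L - 1) (|L - s| + 1) (by omega) (by omega)
            (by rw [pvAbsLe _ _ (by omega), pvAbsLe _ _ (by omega)]; omega) (by omega)]
        try dsimp only
        rw [pvM_get n s (L - 1) (n - 1) (L + 1) (by omega) (by omega),
            if_pos (show L - 1 ≤ L + 1 ∧ L + 1 ≤ n - 1 by omega), if_neg (pvAbs_ne_neg_one _ _)]
        try dsimp only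
        refine ih _ _ (Or.inr (Or.inr (Or.inr (Or.inr (Or.inl ⟨L - 1, by omega, by omega, ?_, rfl, ?_⟩)))))
        · simp
        · push_cast at hf ⊢; omega
      · rw [if_neg (show ¬(0 ≤ L - 1 ∧ L - 1 < n - 1) by omega)]
        simp only [List.nil_append, List.foldl_cons, List.foldl_nil]
        rw [pvM_get n s L (n - 1) (L + 1) (by omega) (by omega),
            if_pos (show L ≤ L + 1 ∧ L + 1 ≤ n - 1 by omega), if_neg (pvAbs_ne_neg_one _ _)]
        try dsimp only
        rw [show L = 0 by omega]
        simp only [bfsLoop]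
    · subst hq hd; rfl

lemma pvBfs (n s : Int) (hs0 : 0 ≤ s) (hs1 : s < n) :
    bfs_distances (pvGraphA n) s n = (PySem.List.pyRange 0 n 1).map (fun i => |i - s|) := by
  show bfsLoop (pvGraphA n) (n.toNat + 1) (PySem.List.pySetD (List.replicate n.toNat (-1 : Int)) s 0) [s] = _
  have hrep : List.replicate n.toNat (-1 : Int) = (PySem.List.pyRange 0 n 1).map (fun _ => -1) := by
    rw [List.map_const', PySem.List.length_pyRange_one]
    norm_num
  rw [hrep, pvSet_map _ _ _ _ hs0]
  have hinit : (PySem.List.pyRange 0 n 1).map (fun i => if i = s then (0 : Int) else -1) = pvM n s s s := by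
    unfold pvM
    apply List.map_congr_left
    intro i hi
    rw [PySem.List.mem_pyRange_one] at hi
    by_cases h : i = s
    · subst h; rw [if_pos rfl, if_pos (by omega)]; simp
    · rw [if_neg h, if_neg (by omega)]
  rw [hinit, pvInv_run n s hs0 hs1 _ _ _ (Or.inl ⟨rfl, rfl, by push_cast; omega⟩)]
  unfold pvM
  apply List.map_congr_left
  intro i hi
  rw [PySem.List.mem_pyRange_one] at hi
  rw [if_pos (by omega)]

lemma pvW_eq (n : Int) :
    (PySem.List.pyRange 1 n 3).map (fun i => i + 1) = PySem.List.pyRange 2 (n + 1) 3 := by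
  rw [PySem.List.pyRange_of_pos 1 n (by norm_num), PySem.List.pyRange_of_pos 2 (n+1) (by norm_num), List.map_map]
  by_cases h : 1 < n
  · rw [if_pos h, if_pos (by omega), show n + 1 - 2 + 3 - 1 = n - 1 + 3 - 1 by ring]
    apply List.map_congr_left
    intro k _
    simp [Function.comp]
    ring
  · rw [if_neg h, if_neg (by omega)]
    simp

-- ===== VERDICT (by name: the statement is the Claim_ definition above) =====
theorem calculate_local_metric_basis_spec : Claim_equal_calculate_local_metric_basis := by
  intro n _ hpre
  unfold Spec_calculate_local_metric_basis
  simp only [calculate_local_metric_basis, calculate_local_metric_basis_alt]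
  rw [pvW_eq n]
  have hmem : ∀ v ∈ (if PySem.Int.mod n 3 ≠ 0 ∧ n ∉ PySem.List.pyRange 2 (n + 1) 3
      then PySem.List.pyRange 2 (n + 1) 3 ++ [n] else PySem.List.pyRange 2 (n + 1) 3),
      0 ≤ v - 1 ∧ v - 1 < n := by
    intro v hv
    have hrange : ∀ w : Int, w ∈ PySem.List.pyRange 2 (n + 1) 3 → 0 ≤ w - 1 ∧ w - 1 < n := by
      intro w hw
      rw [PySem.List.mem_pyRange_iff_of_pos (by norm_num)] at hw
      omega
    by_cases hc : PySem.Int.mod n 3 ≠ 0 ∧ n ∉ PySem.List.pyRange 2 (n + 1) 3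
    · rw [if_pos hc] at hv
      rcases List.mem_append.mp hv with h | h
      · exact hrange v h
      · have hn0 : n ≠ 0 := by
          intro h0
          exact hc.1 (by rw [h0]; exact (PySem.Int.mod_eq_zero_iff_dvd 0 3).mpr (dvd_zero 3))
        have hnn : 0 ≤ n := by
          rcases hpre with h' | h'
          · exact h'
          · exact absurd h' hc.1
        rw [List.mem_singleton] at h
        omega
    · rw [if_neg hc] at hv
      exact hrange v hv
  refine congrArg₂ Prod.mk rfl (congrArg₂ Prod.mk ?_ ?_)
  · refine congrArg PySem.Dict.items ?_
    apply PySem.List.foldl_congr_mem'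
    intro v hv acc
    exact congrArg (acc.insert v) (pvBfs n (v - 1) (hmem v hv).1 (hmem v hv).2)
  · have hgraph : (pvGraphA n).items =
        ((PySem.List.pyRange 0 n 1).foldl
          (fun d i => d.insert i ((if 0 < i then [i - 1] else []) ++ (if i < n - 1 then [i + 1] else [])))
          PySem.Dict.empty).items := by
      rw [pvGraphA_items,
          PySem.Dict.items_foldl_insert_fresh _ (fun i : Int => i)
            (fun i : Int => (if 0 < i then [i - 1] else []) ++ (if i < n - 1 then [i + 1] else [])) _
            (fun a _ => by simp [PySem.Dict.contains_empty]) (by simpa using PySem.List.nodup_pyRange_one 0 n)]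
      simp [PySem.Dict.empty, pvNbrs]
    exact hgraph
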